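-- pv_equiv track=rewrite | github.com/menggezhang97/vsgui10k_preprocessing | trial__version1_fail/preprocess_vsgui10k.py | find_first_dwell_hit_index
-- ===== SOURCE A (Python) =====
-- def find_first_dwell_hit_index(hit_list, min_hits):
--     c = 0
--     for i, h in enumerate(hit_list):
--         if h:
--             c += 1
--             if c >= min_hits:
--                 return i
--     return None
-- ===== SOURCE B (Python) =====
-- def find_first_dwell_hit_index(hit_list, min_hits):
--     hits = [i for i, h in enumerate(hit_list) if h]
--     k = max(min_hits, 1) - 1
--     return hits[k] if k < len(hits) else None
-- ===== Notes on version B (the rewrite author's own statement) =====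
-- stated objective: alternative
-- what changed: Replaces the early-exit counting scan with collecting all truthy positions via a comprehension and indexing the (max(min_hits,1)-1)-th one.
import Mathlib
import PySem

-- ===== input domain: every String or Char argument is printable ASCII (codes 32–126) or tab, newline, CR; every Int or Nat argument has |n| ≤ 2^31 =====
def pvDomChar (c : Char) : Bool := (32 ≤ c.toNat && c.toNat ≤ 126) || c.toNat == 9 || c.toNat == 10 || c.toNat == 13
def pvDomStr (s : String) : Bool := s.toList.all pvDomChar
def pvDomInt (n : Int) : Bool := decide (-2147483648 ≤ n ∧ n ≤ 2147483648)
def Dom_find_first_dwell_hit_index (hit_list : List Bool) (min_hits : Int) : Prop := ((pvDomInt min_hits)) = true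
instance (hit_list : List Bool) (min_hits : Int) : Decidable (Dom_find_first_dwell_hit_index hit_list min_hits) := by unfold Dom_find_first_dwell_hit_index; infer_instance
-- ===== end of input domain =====

-- B collects the positions of truthy elements and indexes the (max(min_hits,1)-1)-th one,
-- instead of A's early-exit counting scan; objective: alternative decomposition (same cost).

-- ===== PORT A =====
def ffLoop (min_hits : Int) : List Bool → Int → Int → Option Int
  | [], _i, _c => none
  | h :: t, i, c =>
    if h then
      let c' := c + 1
      if c' ≥ min_hits then some i else ffLoop min_hits t (i + 1) c'
    else ffLoop min_hits t (i + 1) c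

def find_first_dwell_hit_index (hit_list : List Bool) (min_hits : Int) : Option Int :=
  ffLoop min_hits hit_list 0 0

-- ===== PORT B =====
-- hits = [i for i, h in enumerate(hit_list) if h]
def altHits : List Bool → Int → List Int
  | [], _i => []
  | h :: t, i => if h then i :: altHits t (i + 1) else altHits t (i + 1)

def find_first_dwell_hit_index_alt (hit_list : List Bool) (min_hits : Int) : Option Int :=
  let hits := altHits hit_list 0
  let k := max min_hits 1 - 1
  if k < (hits.length : Int) then PySem.List.pyGet? hits k else none

-- ===== PRECONDITION & SPEC =====
def Spec_find_first_dwell_hit_index (hit_list : List Bool) (min_hits : Int) (out : Option Int) : Prop := out = find_first_dwell_hit_index_alt hit_list min_hits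
instance (hit_list : List Bool) (min_hits : Int) (out : Option Int) : Decidable (Spec_find_first_dwell_hit_index hit_list min_hits out) := by unfold Spec_find_first_dwell_hit_index; infer_instance

-- ===== CLAIM =====
def Claim_equal_find_first_dwell_hit_index : Prop := ∀ (hit_list : List Bool) (min_hits : Int), Dom_find_first_dwell_hit_index hit_list min_hits → Spec_find_first_dwell_hit_index hit_list min_hits (find_first_dwell_hit_index hit_list min_hits)

-- ===== LEMMAS AND PROOFS =====
lemma ffLoop_eq_altHits (m : Int) (t : List Bool) (i c : Int) :
    ffLoop m t i c =
      (if max (m - c) 1 - 1 < ((altHits t i).length : Int)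
       then PySem.List.pyGet? (altHits t i) (max (m - c) 1 - 1) else none) := by
  induction t generalizing i c with
  | nil =>
    simp only [ffLoop, altHits, List.length_nil]
    rw [if_neg (by omega)]
  | cons h t ih =>
    by_cases hh : h
    · subst hh
      simp only [ffLoop, altHits, if_true]
      by_cases hm : c + 1 ≥ m
      · rw [if_pos hm]
        have hk : max (m - c) 1 - 1 = 0 := by omega
        rw [hk]
        rw [if_pos (by simp)]
        exact (PySem.List.pyGet?_zero_cons _ _).symm
      · rw [if_neg hm, ih]
        have hk : max (m - c) 1 - 1 = (max (m - (c + 1)) 1 - 1) + 1 := by omega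
        have hnn : 0 ≤ max (m - (c + 1)) 1 - 1 := by omega
        rw [hk]
        have hcast : max (m - (c + 1)) 1 - 1 = ((max (m - (c + 1)) 1 - 1).toNat : Int) := by omega
        rw [hcast, PySem.List.pyGet?_cons_succ]
        simp only [List.length_cons]
        rw [← hcast]
        by_cases hlen : max (m - (c + 1)) 1 - 1 < ((altHits t (i + 1)).length : Int)
        · rw [if_pos hlen, if_pos (by push_cast; omega)]
        · rw [if_neg hlen, if_neg (by push_cast; omega)]
    · simp only [Bool.not_eq_true] at hh; subst hh
      simp only [ffLoop, altHits, if_false, Bool.false_eq_true]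
      exact ih _ _

-- ===== VERDICT =====
theorem find_first_dwell_hit_index_spec : Claim_equal_find_first_dwell_hit_index := by
  intro hit_list min_hits _
  unfold Spec_find_first_dwell_hit_index find_first_dwell_hit_index find_first_dwell_hit_index_alt
  simpa using ffLoop_eq_altHits min_hits hit_list 0 0
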